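-- pv_equiv track=rewrite | github.com/shikixyx/AtCoder | Enterprise/aising/2020/2020_D.py | solve
-- ===== SOURCE A (Python) =====
-- def solve(x, c):
--     if x == 0:
--         return c
--
--     b = 0
--     nx = x
--     while nx > 0:
--         b += nx & 1
--         nx >>= 1
--
--     ret = solve(x % b, c + 1)
--     return ret
-- ===== SOURCE B (Python) =====
-- def solve(x, c):
--     # Iterative rewrite: loop instead of recursion; popcount via bin(x).count("1")
--     while x != 0:
--         b = bin(x).count("1")
--         x %= b
--         c += 1
--     return c
-- ===== Notes on version B (the rewrite author's own statement) =====
-- stated objective: idiomatic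
-- what changed: Replaced the tail recursion by a while loop and the manual shift-and-mask bit loop by the idiomatic bin(x).count('1') popcount.
import Mathlib
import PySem

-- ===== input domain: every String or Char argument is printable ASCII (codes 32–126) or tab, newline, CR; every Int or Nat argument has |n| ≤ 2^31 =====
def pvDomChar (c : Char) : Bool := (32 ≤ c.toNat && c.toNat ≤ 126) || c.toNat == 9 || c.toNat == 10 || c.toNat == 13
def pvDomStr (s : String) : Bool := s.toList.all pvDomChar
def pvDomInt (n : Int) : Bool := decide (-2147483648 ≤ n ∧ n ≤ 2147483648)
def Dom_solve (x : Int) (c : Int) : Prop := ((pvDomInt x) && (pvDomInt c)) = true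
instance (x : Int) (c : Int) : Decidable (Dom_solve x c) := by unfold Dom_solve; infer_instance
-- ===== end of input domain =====

-- B rewrites A's tail recursion as a while loop and computes the popcount with bin(x).count("1") instead of A's manual shift-and-mask loop (idiomatic; return value only).


-- ===== PORT A =====
-- A's inner loop `while nx > 0: b += nx & 1; nx >>= 1` (nx >> 1 is Lean's nx >>> 1, nx & 1 is PySem.Int.band)
-- termination lemma for popA, cited by its decreasing_by
theorem popA_dec (nx : Int) (h : 0 < nx) : (nx >>> (1 : Nat)).toNat < nx.toNat := by
  have hs : nx >>> (1 : Nat) = nx / 2 := by simp [Int.shiftRight_eq_div_pow]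
  omega
def popA (nx : Int) (b : Int) : Int :=
  if h : 0 < nx then popA (nx >>> (1 : Nat)) (b + PySem.Int.band nx 1) else b
termination_by nx.toNat
decreasing_by exact popA_dec nx h

-- bounds on popA, cited by `solve`'s termination proof
theorem popA_ge : ∀ (n : Nat) (nx b : Int), nx.toNat ≤ n → 0 < nx → b + 1 ≤ popA nx b := by
  intro n
  induction n with
  | zero => intro nx b h h0; omega
  | succ n ih =>
    intro nx b h h0
    rw [popA]
    simp only [h0, dif_pos]
    have hs : nx >>> (1 : Nat) = nx / 2 := by simp [Int.shiftRight_eq_div_pow]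
    have hb : PySem.Int.band nx 1 = nx % 2 := by
      rw [PySem.Int.band_one, PySem.Int.mod_eq_emod_of_pos (by norm_num)]
    rw [hs, hb]
    by_cases h2 : 0 < nx / 2
    · have := ih (nx / 2) (b + nx % 2) (by omega) h2
      omega
    · have hx1 : nx = 1 := by omega
      subst hx1
      rw [popA]
      norm_num
theorem popA_le : ∀ (n : Nat) (nx b : Int), nx.toNat ≤ n → 0 ≤ nx → popA nx b ≤ b + nx := by
  intro n
  induction n with
  | zero =>
    intro nx b h h0
    have hx : nx = 0 := by omega
    subst hx; rw [popA]; norm_num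
  | succ n ih =>
    intro nx b h h0
    rw [popA]
    by_cases hp : 0 < nx
    · simp only [hp, dif_pos]
      have hs : nx >>> (1 : Nat) = nx / 2 := by simp [Int.shiftRight_eq_div_pow]
      have hb : PySem.Int.band nx 1 = nx % 2 := by
        rw [PySem.Int.band_one, PySem.Int.mod_eq_emod_of_pos (by norm_num)]
      rw [hs, hb]
      have := ih (nx / 2) (b + nx % 2) (by omega) (by omega)
      omega
    · simp only [hp, dif_neg, not_false_iff]
      omega

-- termination lemma for solve, cited by its decreasing_by
theorem solve_dec (x : Int) (h : 0 < x) : (PySem.Int.mod x (popA x 0)).toNat < x.toNat := by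
  have hb1 : (0 : Int) + 1 ≤ popA x 0 := popA_ge x.toNat x 0 le_rfl h
  have hb2 : popA x 0 ≤ 0 + x := popA_le x.toNat x 0 le_rfl (le_of_lt h)
  rw [PySem.Int.mod_eq_emod_of_pos (by omega)]
  have h1 := Int.emod_nonneg x (show popA x 0 ≠ 0 by omega)
  have h2 := Int.emod_lt_of_pos x (show 0 < popA x 0 by omega)
  omega
def solve (x : Int) (c : Int) : Int :=
  if x = 0 then c
  else if h : 0 < x then
    let b := popA x 0
    let ret := solve (PySem.Int.mod x b) (c + 1)
    ret
  else 0  -- x < 0: here Python's b = 0 and `x % b` raises ZeroDivisionError (excluded by Pre_solve); 0 is a totality filler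
termination_by x.toNat
decreasing_by exact solve_dec x h

-- ===== PORT B =====
-- bin(x).count("1") is PySem.Int.bitCount (counts the '1' digits of Python's bin(x): the bits of |x|) — exact
-- facts about bitCount cited by solveLoop's termination proof
theorem bitCount_pos_of_pos : ∀ (n : Nat) (x : Int), x.toNat ≤ n → 0 < x → 0 < PySem.Int.bitCount x := by
  intro n
  induction n with
  | zero => intro x h h0; omega
  | succ n ih =>
    intro x h h0
    have h1 := PySem.Int.bitCount_of_pos (n := x) h0
    have h2 : PySem.Int.mod x 2 = x % 2 := PySem.Int.mod_eq_emod_of_pos (by norm_num)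
    have h4 : PySem.Int.floordiv x 2 = x / 2 := PySem.Int.floordiv_eq_ediv_of_pos (by norm_num)
    rw [h2, h4] at h1
    by_cases hm : x % 2 = 1
    · omega
    · have hx2 : 0 < x / 2 := by omega
      have := ih (x / 2) (by omega) hx2
      omega
theorem bitCount_pos_of_ne (x : Int) (hx : x ≠ 0) : 0 < PySem.Int.bitCount x := by
  rcases lt_or_gt_of_ne hx with h | h
  · have hn : PySem.Int.bitCount (-(-x)) = PySem.Int.bitCount (-x) := PySem.Int.bitCount_neg (-x)
    rw [neg_neg] at hn
    rw [hn]
    exact bitCount_pos_of_pos (-x).toNat (-x) le_rfl (by omega)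
  · exact bitCount_pos_of_pos x.toNat x le_rfl h
theorem bitCount_le_natAbs (x : Int) (hx : x ≠ 0) : PySem.Int.bitCount x ≤ x.natAbs := by
  have h1 := PySem.Int.bitCount_le_bitLength x
  have h2 := PySem.Int.two_pow_bitLength_le x hx
  have h3 : PySem.Int.bitLength x - 1 < 2 ^ (PySem.Int.bitLength x - 1) := Nat.lt_two_pow_self
  omega

-- termination lemma for solveLoop, cited by its decreasing_by
theorem solveLoop_dec (x : Int) (hx : ¬ x = 0) :
    (PySem.Int.mod x ((PySem.Int.bitCount x : Nat) : Int)).natAbs < x.natAbs := by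
  have h1 : 0 < PySem.Int.bitCount x := bitCount_pos_of_ne x hx
  have h2 : PySem.Int.bitCount x ≤ x.natAbs := bitCount_le_natAbs x hx
  rw [PySem.Int.mod_eq_emod_of_pos (by exact_mod_cast h1)]
  have h3 := Int.emod_nonneg x (show (PySem.Int.bitCount x : Int) ≠ 0 by exact_mod_cast h1.ne')
  have h4 := Int.emod_lt_of_pos x (show (0 : Int) < (PySem.Int.bitCount x : Int) by exact_mod_cast h1)
  omega
def solveLoop (x : Int) (c : Int) : Int :=
  if hx : x = 0 then c
  else
    let b : Int := (PySem.Int.bitCount x : Int)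
    solveLoop (PySem.Int.mod x b) (c + 1)
termination_by x.natAbs
decreasing_by exact solveLoop_dec x hx

def solve_alt (x : Int) (c : Int) : Int := solveLoop x c

-- ===== PRECONDITION & SPEC =====
-- Pre_solve excludes x < 0, where A's popcount loop never runs (b = 0) and `x % b` raises ZeroDivisionError.
def Pre_solve (x : Int) (c : Int) : Prop := 0 ≤ x
instance (x : Int) (c : Int) : Decidable (Pre_solve x c) := by unfold Pre_solve; infer_instance
def pvWitness_solve : Int × Int := (6, 0)

def Spec_solve (x : Int) (c : Int) (out : Int) : Prop := out = solve_alt x c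
instance (x : Int) (c : Int) (out : Int) : Decidable (Spec_solve x c out) := by unfold Spec_solve; infer_instance

-- ===== CLAIM (what is proved, stated in full; the proofs are below) =====
def Claim_equal_solve : Prop := ∀ (x : Int) (c : Int), Dom_solve x c → Pre_solve x c → Spec_solve x c (solve x c)

-- ===== LEMMAS AND PROOFS =====
-- A's hand-rolled popcount equals bin-digit counting: popA nx b = b + bitCount nx for 0 ≤ nx
theorem popA_eq_bitCount : ∀ (n : Nat) (nx b : Int), nx.toNat ≤ n → 0 ≤ nx →
    popA nx b = b + (PySem.Int.bitCount nx : Int) := by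
  intro n
  induction n with
  | zero =>
    intro nx b h h0
    have hx : nx = 0 := by omega
    subst hx
    rw [popA]
    simp [PySem.Int.bitCount_zero]
  | succ n ih =>
    intro nx b h h0
    rw [popA]
    by_cases hp : 0 < nx
    · simp only [hp, dif_pos]
      have hs : nx >>> (1 : Nat) = nx / 2 := by simp [Int.shiftRight_eq_div_pow]
      have hb : PySem.Int.band nx 1 = nx % 2 := by
        rw [PySem.Int.band_one, PySem.Int.mod_eq_emod_of_pos (by norm_num)]
      rw [hs, hb]
      have h1 := PySem.Int.bitCount_of_pos (n := nx) hp
      have h2 : PySem.Int.mod nx 2 = nx % 2 := PySem.Int.mod_eq_emod_of_pos (by norm_num)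
      have h4 : PySem.Int.floordiv nx 2 = nx / 2 := PySem.Int.floordiv_eq_ediv_of_pos (by norm_num)
      rw [h2, h4] at h1
      have h5 := ih (nx / 2) (b + nx % 2) (by omega) (by omega)
      rw [h5, h1]
      push_cast
      omega
    · have hx : nx = 0 := by omega
      subst hx
      simp [PySem.Int.bitCount_zero]

theorem solve_eq_loop : ∀ (n : Nat) (x c : Int), x.toNat ≤ n → 0 ≤ x → solve x c = solveLoop x c := by
  intro n
  induction n with
  | zero =>
    intro x c h h0
    have hx : x = 0 := by omega
    subst hx
    rw [solve, solveLoop]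
    norm_num
  | succ n ih =>
    intro x c h h0
    by_cases hx : x = 0
    · subst hx
      rw [solve, solveLoop]
      norm_num
    · have hp : 0 < x := by omega
      rw [solve, solveLoop]
      simp only [hx, if_neg, dif_neg, not_false_iff, hp, dif_pos]
      have hb : popA x 0 = (PySem.Int.bitCount x : Int) := by
        have := popA_eq_bitCount x.toNat x 0 le_rfl h0
        omega
      rw [hb]
      have h1 : 0 < PySem.Int.bitCount x := bitCount_pos_of_ne x hx
      have h2 : PySem.Int.bitCount x ≤ x.natAbs := bitCount_le_natAbs x hx
      have hm : PySem.Int.mod x (PySem.Int.bitCount x : Int) = x % (PySem.Int.bitCount x : Int) :=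
        PySem.Int.mod_eq_emod_of_pos (by exact_mod_cast h1)
      have h3 := Int.emod_nonneg x (show (PySem.Int.bitCount x : Int) ≠ 0 by exact_mod_cast h1.ne')
      have h4 := Int.emod_lt_of_pos x (show (0 : Int) < (PySem.Int.bitCount x : Int) by exact_mod_cast h1)
      rw [hm]
      exact ih (x % (PySem.Int.bitCount x : Int)) (c + 1) (by omega) h3

-- ===== VERDICT (by name: the statement is the Claim_ definition above) =====
theorem solve_spec : Claim_equal_solve := by
  intro x c _ hpre
  show solve x c = solve_alt x c
  unfold solve_alt
  exact solve_eq_loop x.toNat x c le_rfl hpre
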